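-- pv_equiv track=rewrite | github.com/dmkato/bear-daily-notes | create_daily_notes.py | strip_incomplete
-- ===== SOURCE A (Python) =====
-- def get_indent(line):
--     return len(line) - len(line.strip())
--
-- def is_complete(line):
--     return len(line.strip()) > 0 and line.strip()[0] == '+'
--
-- def has_children(line, cur_indent, markdown, cur_idx, largest_indent):
--     if cur_idx + 1 >= len(markdown):
--         return False
--     return get_indent(markdown[cur_idx + 1]) == cur_indent + 1
--
-- def strip_incomplete(markdown, largest_indent):
--     new_markdown_lines = markdown.split('\n')
--     for cur_indent in reversed(range(largest_indent+1)):
--         new_markdown_lines = [line for idx, line in enumerate(new_markdown_lines)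
--                               if get_indent(line) != cur_indent
--                               or has_children(line, cur_indent, new_markdown_lines, idx, largest_indent)
--                               or is_complete(line)]
--     return '\n'.join(new_markdown_lines)
-- ===== SOURCE B (Python) =====
-- # Single backward pass: tracks the min indent of discarded lines since the last
-- # kept line (block_min) and the indent of the nearest kept line below (next_kept),
-- # replacing A's one filtering pass per indent level.
--
-- def _indent(line):
--     return len(line) - len(line.strip())
--
-- def _complete(line):
--     s = line.strip()
--     return len(s) > 0 and s[0] == '+'
--
-- def strip_incomplete(markdown, largest_indent):
--     lines = markdown.split('\n')
--     kept = []            # collected back-to-front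
--     block_min = None     # min indent of discarded lines since the last kept line
--     next_kept = None     # indent of the nearest kept line below
--     for line in reversed(lines):
--         d = _indent(line)
--         if _complete(line) or d > largest_indent or \
--                 ((block_min is None or block_min > d) and next_kept == d + 1):
--             kept.append(line)
--             block_min = None
--             next_kept = d
--         else:
--             block_min = d if block_min is None else min(block_min, d)
--     kept.reverse()
--     return '\n'.join(kept)
-- ===== Notes on version B (the rewrite author's own statement) =====
-- stated objective: faster
-- what changed: A filters the whole line list once per indent level from largest_indent down to 0; B makes a single backward pass keeping two scalars (min indent of discarded lines since the last kept line, and the indent of the nearest kept line below) that decide each line's survival directly.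
import Mathlib
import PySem

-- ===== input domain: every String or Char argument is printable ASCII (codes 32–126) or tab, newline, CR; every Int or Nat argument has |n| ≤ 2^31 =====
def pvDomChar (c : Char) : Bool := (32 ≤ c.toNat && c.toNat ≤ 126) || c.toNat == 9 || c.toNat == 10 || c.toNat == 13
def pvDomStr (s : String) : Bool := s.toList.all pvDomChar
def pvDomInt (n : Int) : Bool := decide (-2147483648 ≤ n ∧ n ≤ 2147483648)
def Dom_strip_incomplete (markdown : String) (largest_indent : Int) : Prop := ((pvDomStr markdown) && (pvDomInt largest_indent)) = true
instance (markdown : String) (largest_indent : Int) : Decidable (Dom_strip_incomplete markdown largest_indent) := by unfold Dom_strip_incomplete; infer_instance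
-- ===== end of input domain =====

-- B replaces A's one-filtering-pass-per-indent-level loop by a single backward pass
-- over the lines (objective: faster); the return values agree on every input.

-- ===== PORT A =====
def get_indent (line : String) : Int :=
  PySem.Str.len line - PySem.Str.len (PySem.Str.strip line)

def is_complete (line : String) : Bool :=
  decide (0 < PySem.Str.len (PySem.Str.strip line)) &&
    (PySem.Str.pyGet? (PySem.Str.strip line) 0 == some '+')

def has_children (line : String) (cur_indent : Int) (markdown : List String)
    (cur_idx : Int) (largest_indent : Int) : Bool :=
  if (markdown.length : Int) ≤ cur_idx + 1 then false
  else
    match PySem.List.pyGet? markdown (cur_idx + 1) with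
    | some nxt => get_indent nxt == cur_indent + 1
    | none => false

-- one iteration of A's loop body: the list comprehension over enumerate(new_markdown_lines)
def pass_filter (largest_indent : Int) (ls : List String) (cur_indent : Int) : List String :=
  ((PySem.List.enumerate ls).filter
    (fun p => !(get_indent p.2 == cur_indent)
              || has_children p.2 cur_indent ls p.1 largest_indent
              || is_complete p.2)).map (·.2)

def strip_incomplete (markdown : String) (largest_indent : Int) : String :=
  let lines := (PySem.Str.split? markdown "\n").getD []
  let final := ((PySem.List.pyRange 0 (largest_indent + 1) 1).reverse).foldl
                 (fun ls d => pass_filter largest_indent ls d) lines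
  PySem.Str.join "\n" final

-- ===== PORT B =====
def b_indent (line : String) : Int :=
  PySem.Str.len line - PySem.Str.len (PySem.Str.strip line)

def b_complete (line : String) : Bool :=
  decide (0 < PySem.Str.len (PySem.Str.strip line)) &&
    (PySem.Str.pyGet? (PySem.Str.strip line) 0 == some '+')

-- loop body of B's single backward pass (state: kept lines, block_min, next_kept)
def b_step (largest_indent : Int) (line : String)
    (st : List String × Option Int × Option Int) : List String × Option Int × Option Int :=
  let d := b_indent line
  if b_complete line || decide (largest_indent < d)
      || ((match st.2.1 with | none => true | some m => decide (d < m))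
          && (st.2.2 == some (d + 1))) then
    (st.1 ++ [line], none, some d)
  else
    (st.1, some (match st.2.1 with | none => d | some m => min m d), st.2.2)

def strip_incomplete_alt (markdown : String) (largest_indent : Int) : String :=
  let lines := (PySem.Str.split? markdown "\n").getD []
  let st := lines.foldr (b_step largest_indent) ([], none, none)
  PySem.Str.join "\n" st.1.reverse

-- ===== PRECONDITION & SPEC =====
def Spec_strip_incomplete (markdown : String) (largest_indent : Int) (out : String) : Prop := out = strip_incomplete_alt markdown largest_indent
instance (markdown : String) (largest_indent : Int) (out : String) : Decidable (Spec_strip_incomplete markdown largest_indent out) := by unfold Spec_strip_incomplete; infer_instance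

-- ===== CLAIM (what is proved, stated in full; the proofs are below) =====
def Claim_equal_strip_incomplete : Prop := ∀ (markdown : String) (largest_indent : Int), Dom_strip_incomplete markdown largest_indent → Spec_strip_incomplete markdown largest_indent (strip_incomplete markdown largest_indent)

-- ===== LEMMAS AND PROOFS =====

-- indents are nonnegative: strip only removes characters
theorem strip_length_le (cs : List Char) : (PySem.Chars.strip cs).length ≤ cs.length := by
  simp only [PySem.Chars.strip, PySem.Chars.rstrip, PySem.Chars.lstrip, List.length_reverse]
  calc (List.dropWhile PySem.Chars.isspace (List.dropWhile PySem.Chars.isspace cs).reverse).length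
      ≤ (List.dropWhile PySem.Chars.isspace cs).reverse.length := List.length_dropWhile_le _ _
    _ ≤ cs.length := by simpa using List.length_dropWhile_le _ _

theorem get_indent_nonneg (l : String) : 0 ≤ get_indent l := by
  have h := strip_length_le l.toList
  simp only [get_indent, PySem.Str.len_eq, PySem.Str.toList_strip]
  omega

-- B's scalar survival test: block_min is above d and the nearest kept line has indent d+1
def chk (bm : Option Int) (nk : Option Int) (d : Int) : Bool :=
  (match bm with | none => true | some m => decide (d < m)) && (nk == some (d + 1))

def minO (bm : Option Int) (d : Int) : Int :=
  match bm with | none => d | some m => min m d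

def goCond (L : Int) (l : String) (bm nk : Option Int) : Bool :=
  is_complete l || decide (L < get_indent l) || chk bm nk (get_indent l)

-- proof-side restatement of B's backward pass (cons-accumulating)
def go (L : Int) : List String → List String × Option Int × Option Int
  | [] => ([], none, none)
  | l :: rest =>
    let s := go L rest
    if goCond L l s.2.1 s.2.2 then (l :: s.1, none, some (get_indent l))
    else (s.1, some (minO s.2.1 (get_indent l)), s.2.2)

-- does line l (with tail rest) survive B's pass?
def keepB (L : Int) (l : String) (rest : List String) : Bool :=
  goCond L l (go L rest).2.1 (go L rest).2.2

theorem go_cons (L : Int) (l : String) (rest : List String) :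
    go L (l :: rest)
      = if keepB L l rest then (l :: (go L rest).1, none, some (get_indent l))
        else ((go L rest).1, some (minO (go L rest).2.1 (get_indent l)), (go L rest).2.2) := rfl

-- the lines surviving A's passes from L down to m (characterisation to be proved)
def filterS (L m : Int) : List String → List String
  | [] => []
  | l :: rest =>
    if decide (get_indent l < m) || keepB L l rest then l :: filterS L m rest
    else filterS L m rest

-- structural form of one of A's passes
def passS (d : Int) : List String → List String
  | [] => []
  | l :: rest =>
    if !(get_indent l == d)
        || (match rest.head? with | some l' => get_indent l' == d + 1 | none => false)
        || is_complete l then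
      l :: passS d rest
    else passS d rest

-- A's passes from (m+k-1) down to m, fuelled
def Dk (m : Int) : Nat → List String → List String
  | 0, ls => ls
  | k + 1, ls => Dk m k (passS (m + k) ls)

-- survival condition of line l (tail rest) under the passes (m+k-1) … m
def condA (m : Int) (k : Nat) (l : String) (rest : List String) : Bool :=
  decide (get_indent l < m) || decide (m + (k : Int) ≤ get_indent l) || is_complete l
    || (match (Dk (get_indent l + 1) ((m + (k : Int)) - (get_indent l + 1)).toNat rest).head? with
        | some x => get_indent x == get_indent l + 1
        | none => false)

theorem b_indent_eq : b_indent = get_indent := rfl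

theorem b_complete_eq : b_complete = is_complete := rfl

-- b_step's foldr equals go with the accumulator reversed
theorem foldr_bstep_eq_go (L : Int) (ls : List String) :
    ls.foldr (b_step L) ([], none, none) = ((go L ls).1.reverse, (go L ls).2) := by
  induction ls with
  | nil => rfl
  | cons l rest ih =>
    rcases hg : go L rest with ⟨out, bm, nk⟩
    rw [List.foldr_cons, ih, hg]
    have hkb : keepB L l rest = goCond L l bm nk := by
      unfold keepB
      simp only [hg]
    cases bm with
    | none =>
      simp only [b_step, go_cons, hkb, hg, goCond, chk, minO, b_indent_eq, b_complete_eq,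
        Bool.or_eq_true, Bool.and_eq_true, decide_eq_true_eq, beq_iff_eq]
      split_ifs <;> simp
    | some m =>
      simp only [b_step, go_cons, hkb, hg, goCond, chk, minO, b_indent_eq, b_complete_eq,
        Bool.or_eq_true, Bool.and_eq_true, decide_eq_true_eq, beq_iff_eq]
      split_ifs <;> simp

-- pass_filter equals the structural pass (generalised over a consumed prefix)
theorem pass_filter_aux (L d : Int) :
    ∀ (suf pre : List String),
      ((PySem.List.enumerate suf (pre.length : Int)).filter
        (fun p => !(get_indent p.2 == d)
                  || has_children p.2 d (pre ++ suf) p.1 L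
                  || is_complete p.2)).map (·.2) = passS d suf := by
  intro suf
  induction suf with
  | nil => intro pre; simp [PySem.List.enumerate_nil, passS]
  | cons l rest ih =>
    intro pre
    have hch : has_children l d (pre ++ l :: rest) (pre.length : Int) L
        = (match rest.head? with | some l' => get_indent l' == d + 1 | none => false) := by
      cases rest with
      | nil =>
        simp [has_children]
      | cons r rest' =>
        have hlen : ¬ ((pre ++ l :: r :: rest').length : Int) ≤ (pre.length : Int) + 1 := by
          simp only [List.length_append, List.length_cons]
          push_cast
          omega
        have hget : PySem.List.pyGet? (pre ++ l :: r :: rest') ((pre.length : Int) + 1)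
            = some r := by
          have := PySem.List.pyGet?_append_length (pre := pre ++ [l]) (y := r) (ys := rest')
          simpa [List.append_assoc, List.length_append] using this
        simp [has_children, hlen, hget]
    have hstart : ((pre ++ [l]).length : Int) = (pre.length : Int) + 1 := by
      simp
    have ihpre := ih (pre ++ [l])
    rw [hstart, List.append_assoc, List.singleton_append] at ihpre
    rw [PySem.List.enumerate_cons, List.filter_cons]
    simp only [passS, hch]
    set c := (!(get_indent l == d)
        || (match rest.head? with | some l' => get_indent l' == d + 1 | none => false)
        || is_complete l) with hc
    split
    · rw [List.map_cons, ihpre]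
    · exact ihpre

theorem pass_filter_eq_passS (L d : Int) (ls : List String) :
    pass_filter L ls d = passS d ls := by
  have := pass_filter_aux L d ls []
  simpa [pass_filter] using this

-- the reversed range foldl is the fuelled pass composition
theorem foldl_rev_range (L : Int) :
    ∀ (k : Nat) (m : Int) (ls : List String),
      ((PySem.List.pyRange m (m + k) 1).reverse).foldl (fun ls d => pass_filter L ls d) ls
        = Dk m k ls := by
  intro k
  induction k with
  | zero => intro m ls; simp [PySem.List.pyRange_one_eq_nil, Dk]
  | succ k ih =>
    intro m ls
    have hsplit : PySem.List.pyRange m (m + (k + 1 : Nat)) 1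
        = PySem.List.pyRange m (m + k) 1 ++ [m + k] := by
      have : (m + (k + 1 : Nat) : Int) = (m + k) + 1 := by push_cast; ring
      rw [this]
      exact PySem.List.pyRange_one_succ_right (by omega)
    rw [hsplit]
    simp only [List.reverse_append, List.reverse_singleton, List.singleton_append,
      List.foldl_cons]
    rw [pass_filter_eq_passS L (m + (k : Int)) ls, ih]
    rfl

theorem Dk_nil (m : Int) (k : Nat) : Dk m k [] = [] := by
  induction k with
  | zero => rfl
  | succ k ih => simpa [Dk, passS] using ih

-- head-of-survivors test equals go's scalar test
theorem head_chk (L : Int) (ls : List String) :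
    ∀ d : Int,
      chk (go L ls).2.1 (go L ls).2.2 d
        = (match (filterS L (d + 1) ls).head? with
           | some x => get_indent x == d + 1
           | none => false) := by
  induction ls with
  | nil => intro d; simp [go, filterS, chk]
  | cons l rest ih =>
    intro d
    by_cases hk : keepB L l rest = true
    · rw [go_cons, if_pos hk]
      have hf : filterS L (d + 1) (l :: rest) = l :: filterS L (d + 1) rest := by
        simp only [filterS]
        rw [if_pos (by rw [hk]; simp)]
      rw [hf]
      simp [chk]
    · have hkf : keepB L l rest = false := by simpa using hk
      rw [go_cons, if_neg (by rw [hkf]; simp)]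
      rcases (Int.lt_or_le d (get_indent l)).symm with hd | hd
      · have hf : filterS L (d + 1) (l :: rest) = l :: filterS L (d + 1) rest := by
          simp only [filterS]
          rw [if_pos (by have h1 : decide (get_indent l < d + 1) = true := by simp; omega
                         rw [h1]; simp)]
        rw [hf]
        have hR : (get_indent l == d + 1) = false := by simp; omega
        have hL : chk (some (minO (go L rest).2.1 (get_indent l))) (go L rest).2.2 d
            = false := by
          simp only [chk, minO]
          cases (go L rest).2.1 with
          | none =>
            dsimp only
            have hx : ¬ (d < get_indent l) := by omega
            simp [hx]
          | some m =>
            dsimp only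
            have hx : ¬ (d < min m (get_indent l)) := by omega
            simp [hx]
        rw [hL]
        simp [hR]
      · have hf : filterS L (d + 1) (l :: rest) = filterS L (d + 1) rest := by
          simp only [filterS]
          rw [if_neg (by rw [hkf]; simp; omega)]
        rw [hf, ← ih d]
        simp only [chk, minO]
        cases hbm : (go L rest).2.1 with
        | none =>
          dsimp only
          simp [hd]
        | some m =>
          dsimp only
          have hx : (d < min m (get_indent l)) ↔ (d < m) := by omega
          simp [hx]

-- go's kept list is filterS at level 0
theorem go_fst_eq_filterS (L : Int) (ls : List String) :
    (go L ls).1 = filterS L 0 ls := by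
  induction ls with
  | nil => rfl
  | cons l rest ih =>
    have hnn := get_indent_nonneg l
    by_cases hk : keepB L l rest = true
    · rw [go_cons, if_pos hk]
      simp only [filterS]
      rw [if_pos (by rw [hk]; simp)]
      simpa using ih
    · have hkf : keepB L l rest = false := by simpa using hk
      rw [go_cons, if_neg (by rw [hkf]; simp)]
      simp only [filterS]
      rw [if_neg (by rw [hkf]; simp; omega)]
      simpa using ih

-- A's single structural pass distributes over cons, with the survival condition made explicit
theorem passC (k : Nat) :
    ∀ (m : Int) (l : String) (rest : List String),
      Dk m k (l :: rest)
        = if condA m k l rest = true then l :: Dk m k rest else Dk m k rest := by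
  induction k with
  | zero =>
    intro m l rest
    have e : condA m 0 l rest = true := by
      unfold condA
      rcases lt_or_ge (get_indent l) m with h | h
      · have : decide (get_indent l < m) = true := by simpa using h
        rw [this]; simp
      · have : decide (m + ((0 : Nat) : Int) ≤ get_indent l) = true := by simp; omega
        rw [this]; simp
    rw [if_pos e]
    rfl
  | succ k ih =>
    intro m l rest
    have hstep : Dk m (k + 1) (l :: rest) = Dk m k (passS (m + (k : Int)) (l :: rest)) := rfl
    have htail : Dk m k (passS (m + (k : Int)) rest) = Dk m (k + 1) rest := rfl
    by_cases hc0 : (!(get_indent l == m + (k : Int))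
        || (match rest.head? with | some l' => get_indent l' == m + (k : Int) + 1 | none => false)
        || is_complete l) = true
    · have hps : passS (m + (k : Int)) (l :: rest) = l :: passS (m + (k : Int)) rest := by
        simp only [passS]
        rw [if_pos hc0]
      rw [hstep, hps, ih m l (passS (m + (k : Int)) rest), htail]
      rcases lt_or_ge (get_indent l) m with h1 | h1
      · have eL : condA m k l (passS (m + (k : Int)) rest) = true := by
          unfold condA
          have : decide (get_indent l < m) = true := by simpa using h1
          rw [this]; simp
        have eR : condA m (k + 1) l rest = true := by
          unfold condA
          have : decide (get_indent l < m) = true := by simpa using h1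
          rw [this]; simp
        rw [eL, eR]
      · rcases lt_or_ge (get_indent l) (m + (k : Int)) with h2 | h2
        · -- m ≤ d < m + k : examined in a later pass
          have e1 : decide (get_indent l < m) = false := by simp; omega
          have e2 : decide (m + ((k : Nat) : Int) ≤ get_indent l) = false := by simp; omega
          have e3 : decide (m + ((k + 1 : Nat) : Int) ≤ get_indent l) = false := by
            simp; push_cast; omega
          have hfuel : ((m + ((k + 1 : Nat) : Int)) - (get_indent l + 1)).toNat
              = ((m + (k : Int)) - (get_indent l + 1)).toNat + 1 := by
            push_cast; omega
          have harg : get_indent l + 1 + ((((m + (k : Int)) - (get_indent l + 1)).toNat : Nat) : Int)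
              = m + (k : Int) := by push_cast; omega
          have hDk : Dk (get_indent l + 1) ((m + ((k + 1 : Nat) : Int)) - (get_indent l + 1)).toNat rest
              = Dk (get_indent l + 1) ((m + (k : Int)) - (get_indent l + 1)).toNat
                  (passS (m + (k : Int)) rest) := by
            rw [hfuel]
            simp only [Dk]
            rw [harg]
          have hcc : condA m k l (passS (m + (k : Int)) rest) = condA m (k + 1) l rest := by
            unfold condA
            rw [e1, e2, e3, hDk]
          rw [hcc]
        · rcases eq_or_lt_of_le h2 with h3 | h3
          · -- d = m + k : examined in this very pass
            have ha : (get_indent l == m + (k : Int)) = true := by simp; omega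
            have hbc : ((match rest.head? with
                | some l' => get_indent l' == m + (k : Int) + 1 | none => false)
                || is_complete l) = true := by
              rw [ha] at hc0
              simpa using hc0
            have eL : condA m k l (passS (m + (k : Int)) rest) = true := by
              unfold condA
              have : decide (m + ((k : Nat) : Int) ≤ get_indent l) = true := by simp; omega
              rw [this]; simp
            have eR : condA m (k + 1) l rest = true := by
              unfold condA
              have hfuel0 : ((m + ((k + 1 : Nat) : Int)) - (get_indent l + 1)).toNat = 0 := by
                push_cast; omega
              rw [hfuel0]
              simp only [Dk]
              have hdeq : get_indent l = m + (k : Int) := by simpa using ha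
              rw [hdeq]
              cases hx : (match rest.head? with
                  | some l' => get_indent l' == m + (k : Int) + 1 | none => false) with
              | true => simp
              | false =>
                have hcomp : is_complete l = true := by
                  rw [hx] at hbc
                  simpa using hbc
                simp [hcomp]
            rw [eL, eR]
          · -- d ≥ m + k + 1 : never examined
            have eL : condA m k l (passS (m + (k : Int)) rest) = true := by
              unfold condA
              have : decide (m + ((k : Nat) : Int) ≤ get_indent l) = true := by simp; omega
              rw [this]; simp
            have eR : condA m (k + 1) l rest = true := by
              unfold condA
              have : decide (m + ((k + 1 : Nat) : Int) ≤ get_indent l) = true := by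
                simp; push_cast; omega
              rw [this]; simp
            rw [eL, eR]
    · -- the line is removed in this very pass
      have ha : (get_indent l == m + (k : Int)) = true := by
        by_contra hx
        apply hc0
        have : (get_indent l == m + (k : Int)) = false := by simpa using hx
        rw [this]; simp
      have hb : (match rest.head? with
          | some l' => get_indent l' == m + (k : Int) + 1 | none => false) = false := by
        by_contra hx
        apply hc0
        have : (match rest.head? with
            | some l' => get_indent l' == m + (k : Int) + 1 | none => false) = true := by
          simpa using hx
        rw [this]; simp
      have hcm : is_complete l = false := by
        by_contra hx
        apply hc0
        have : is_complete l = true := by simpa using hx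
        rw [this]; simp
      have hdeq : get_indent l = m + (k : Int) := by simpa using ha
      have hps : passS (m + (k : Int)) (l :: rest) = passS (m + (k : Int)) rest := by
        simp only [passS]
        rw [if_neg hc0]
      rw [hstep, hps]
      have hcf : condA m (k + 1) l rest = false := by
        unfold condA
        have e1 : decide (get_indent l < m) = false := by simp; omega
        have e3 : decide (m + ((k + 1 : Nat) : Int) ≤ get_indent l) = false := by
          simp; push_cast; omega
        have hfuel0 : ((m + ((k + 1 : Nat) : Int)) - (get_indent l + 1)).toNat = 0 := by
          push_cast; omega
        rw [e1, e3, hfuel0]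
        simp only [Dk, Bool.false_or]
        rw [hcm]
        simp only [Bool.false_or]
        rw [hdeq]
        exact hb
      rw [if_neg (by rw [hcf]; simp)]
      exact htail.symm ▸ rfl

-- the composed passes compute filterS
theorem main_filter (L : Int) :
    ∀ (ls : List String) (m : Int) (k : Nat), 0 ≤ m → m + (k : Int) = L + 1 →
      Dk m k ls = filterS L m ls := by
  intro ls
  induction ls with
  | nil => intro m k _ _; simp [Dk_nil, filterS]
  | cons l rest ih =>
    intro m k hm hk
    rw [passC k m l rest]
    have hrest := ih m k hm hk
    rcases lt_or_ge (get_indent l) m with h1 | h1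
    · have e : condA m k l rest = true := by
        unfold condA
        have : decide (get_indent l < m) = true := by simpa using h1
        rw [this]; simp
      rw [if_pos e]
      simp only [filterS]
      rw [if_pos (by have : decide (get_indent l < m) = true := by simpa using h1
                     rw [this]; simp)]
      rw [hrest]
    · rcases lt_or_ge L (get_indent l) with h2 | h2
      · have e : condA m k l rest = true := by
          unfold condA
          have : decide (m + ((k : Nat) : Int) ≤ get_indent l) = true := by simp; omega
          rw [this]; simp
        have hkB : keepB L l rest = true := by
          unfold keepB goCond
          have : decide (L < get_indent l) = true := by simpa using h2
          rw [this]; simp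
        rw [if_pos e]
        simp only [filterS]
        rw [if_pos (by rw [hkB]; simp)]
        rw [hrest]
      · -- m ≤ d ≤ L
        have hmain := ih (get_indent l + 1) ((L + 1) - (get_indent l + 1)).toNat
          (by omega) (by push_cast; omega)
        have hcond : condA m k l rest = keepB L l rest := by
          unfold condA keepB goCond
          rw [hk]
          have e1 : decide (get_indent l < m) = false := by simp; omega
          have e2 : decide (L + 1 ≤ get_indent l) = false := by simp; omega
          have eL : decide (L < get_indent l) = false := by simp; omega
          rw [e1, e2, eL, hmain, ← head_chk L rest (get_indent l)]
          simp
        rw [hcond]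
        simp only [filterS]
        by_cases hkB : keepB L l rest = true
        · rw [if_pos hkB, if_pos (by rw [hkB]; simp), hrest]
        · have hkf : keepB L l rest = false := by simpa using hkB
          rw [if_neg (by rw [hkf]; simp), if_neg (by rw [hkf]; simp; omega), hrest]

-- when largest_indent < 0, B keeps every line
theorem go_all (L : Int) (hL : L < 0) (ls : List String) : (go L ls).1 = ls := by
  induction ls with
  | nil => rfl
  | cons l rest ih =>
    have hc : keepB L l rest = true := by
      unfold keepB goCond
      have h2 : decide (L < get_indent l) = true := by
        have := get_indent_nonneg l
        simp; omega
      rw [h2]; simp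
    rw [go_cons, if_pos hc]
    simpa using ih

-- ===== VERDICT (by name: the statement is the Claim_ definition above) =====
theorem strip_incomplete_spec : Claim_equal_strip_incomplete := by
  intro markdown L _
  unfold Spec_strip_incomplete strip_incomplete strip_incomplete_alt
  show PySem.Str.join "\n"
      (((PySem.List.pyRange 0 (L + 1) 1).reverse).foldl
        (fun ls d => pass_filter L ls d) ((PySem.Str.split? markdown "\n").getD []))
    = PySem.Str.join "\n"
        (((PySem.Str.split? markdown "\n").getD []).foldr (b_step L) ([], none, none)).1.reverse
  rw [foldr_bstep_eq_go]
  simp only [List.reverse_reverse]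
  congr 1
  by_cases hL : L < 0
  · have hrange : PySem.List.pyRange 0 (L + 1) 1 = [] :=
      PySem.List.pyRange_one_eq_nil (by omega)
    rw [hrange, go_all L hL]
    rfl
  · have hL0 : 0 ≤ L := by omega
    have hk : (0 : Int) + (((L + 1).toNat : Nat) : Int) = L + 1 := by omega
    have hfold := foldl_rev_range L (L + 1).toNat 0 ((PySem.Str.split? markdown "\n").getD [])
    rw [hk] at hfold
    rw [hfold, main_filter L _ 0 (L + 1).toNat le_rfl hk,
      go_fst_eq_filterS]
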